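-- pv_equiv track=rewrite | github.com/leonlan/projecteuler | python/p159.py | compute_all_dr
-- ===== SOURCE A (Python) =====
-- def compute_all_dr(N):
--     """Compute the digital roots of all numbers below N."""
--     def add_digits(n):
--         """Adds the digits of a number n."""
--         return sum([int(d) for d in str(n)])
--
--     DR = dict()
--     for i in range(N):
--         x = i
--         while int(x) > 9:
--             x = add_digits(x)
--             if x in DR:
--                 x = DR[x]
--                 break
--         DR[i] = x
--
--     return DR
-- ===== SOURCE B (Python) =====
-- def compute_all_dr(N):
--     """Compute the digital roots of all numbers below N."""
--     return {i: (0 if i == 0 else 1 + (i - 1) % 9) for i in range(N)}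
-- ===== Notes on version B (the rewrite author's own statement) =====
-- stated objective: faster
-- what changed: Replaces the memoized repeated digit-summing loop (string conversion per step plus a dict lookup) with the closed-form digital root dr(i) = 0 if i == 0 else 1 + (i-1) % 9, computed directly in a dict comprehension.
import Mathlib
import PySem

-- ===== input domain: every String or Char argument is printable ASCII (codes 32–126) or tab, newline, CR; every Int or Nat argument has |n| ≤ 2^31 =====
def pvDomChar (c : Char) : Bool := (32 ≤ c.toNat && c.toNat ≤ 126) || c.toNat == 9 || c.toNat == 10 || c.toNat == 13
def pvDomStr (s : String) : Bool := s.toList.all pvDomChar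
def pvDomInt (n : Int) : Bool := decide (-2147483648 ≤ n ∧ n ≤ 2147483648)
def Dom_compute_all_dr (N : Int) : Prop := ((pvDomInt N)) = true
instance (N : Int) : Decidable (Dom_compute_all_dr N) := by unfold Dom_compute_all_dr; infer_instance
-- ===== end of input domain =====

-- B replaces A's memoized repeated digit-summing with the closed-form digital root
-- 0 if i == 0 else 1 + (i-1) % 9 (objective: faster, O(N) instead of O(N log N)).


-- ===== PORT A =====
-- add_digits(n) = sum([int(d) for d in str(n)]); int(d) on the digit chars of str(n)
-- never raises for the nonnegative n this is applied to, so the `.getD 0` branch is unreachable.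
def pvAddDigits (n : Int) : Int :=
  ((PySem.Int.toStr n).toList.map (fun d => (PySem.Int.ofStr? (String.ofList [d])).getD 0)).sum

-- the `while int(x) > 9: x = add_digits(x); if x in DR: x = DR[x]; break` loop;
-- fuel only makes the recursion structural (x strictly decreases each pass, so x.toNat + 1 always suffices)
def pvLoop (DR : PySem.Dict Int Int) : Nat → Int → Int
  | 0, x => x
  | fuel + 1, x =>
    if x > 9 then
      let x' := pvAddDigits x
      match DR.get? x' with
      | some v => v
      | none => pvLoop DR fuel x'
    else x

def compute_all_dr (N : Int) : List (Int × Int) :=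
  ((PySem.List.pyRange 0 N 1).foldl
      (fun DR i => DR.insert i (pvLoop DR (i.toNat + 1) i))
      (PySem.Dict.empty)).items

-- ===== PORT B =====
-- dict comprehension over range(N) with fresh distinct keys = the assoc list in that order
def compute_all_dr_alt (N : Int) : List (Int × Int) :=
  (PySem.List.pyRange 0 N 1).map
    (fun i => (i, if i = 0 then 0 else 1 + PySem.Int.mod (i - 1) 9))

-- ===== PRECONDITION & SPEC =====
def Spec_compute_all_dr (N : Int) (out : List (Int × Int)) : Prop := out = compute_all_dr_alt N
instance (N : Int) (out : List (Int × Int)) : Decidable (Spec_compute_all_dr N out) := by unfold Spec_compute_all_dr; infer_instance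

-- ===== CLAIM (what is proved, stated in full; the proofs are below) =====
def Claim_equal_compute_all_dr : Prop := ∀ (N : Int), Dom_compute_all_dr N → Spec_compute_all_dr N (compute_all_dr N)

-- ===== LEMMAS AND PROOFS =====

-- the closed-form digital root, the common value of both programs
def pvDr (i : Int) : Int := if i = 0 then 0 else 1 + PySem.Int.mod (i - 1) 9

theorem pvAlt_eq_map (N : Int) :
    compute_all_dr_alt N = (PySem.List.pyRange 0 N 1).map (fun i => (i, pvDr i)) := rfl

-- str(n) digit characters, built front-to-back (proof-side mirror of Nat.toDigitsCore)
def pvDigitsChars (n : Nat) : List Char :=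
  if _h : n < 10 then [Nat.digitChar n]
  else pvDigitsChars (n / 10) ++ [Nat.digitChar (n % 10)]
decreasing_by exact Nat.div_lt_self (by omega) (by omega)

def pvSumDigits (n : Nat) : Nat :=
  if _h : n < 10 then n else pvSumDigits (n / 10) + n % 10
decreasing_by exact Nat.div_lt_self (by omega) (by omega)

theorem pvToDigitsCore_eq (f : Nat) : ∀ (n : Nat) (l : List Char), n < f →
    Nat.toDigitsCore 10 f n l = pvDigitsChars n ++ l := by
  induction f with
  | zero => intro n l h; omega
  | succ f ih =>
    intro n l h
    by_cases h10 : n < 10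
    · have hdiv : n / 10 = 0 := Nat.div_eq_of_lt h10
      simp [Nat.toDigitsCore, hdiv, pvDigitsChars, h10, Nat.mod_eq_of_lt h10]
    · have hdiv : n / 10 ≠ 0 := by
        intro hc; omega
      rw [show Nat.toDigitsCore 10 (f + 1) n l
            = Nat.toDigitsCore 10 f (n / 10) (Nat.digitChar (n % 10) :: l) by
          simp [Nat.toDigitsCore, hdiv]]
      rw [ih (n / 10) _ (by have := Nat.div_lt_self (by omega : 0 < n) (by omega : 1 < 10); omega)]
      conv_rhs => rw [pvDigitsChars]
      simp [h10]

theorem pvToDigits_eq (n : Nat) : Nat.toDigits 10 n = pvDigitsChars n := by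
  have := pvToDigitsCore_eq (n + 1) n [] (by omega)
  simpa [Nat.toDigits] using this

theorem pvCharVal_digit (d : Nat) (hd : d < 10) :
    (PySem.Int.ofChars? [Nat.digitChar d]).getD 0 = (d : Int) := by
  interval_cases d <;> decide

theorem pvSumDigitsChars (n : Nat) :
    ((pvDigitsChars n).map (fun d => (PySem.Int.ofStr? (String.ofList [d])).getD 0)).sum
      = (pvSumDigits n : Int) := by
  induction n using Nat.strong_induction_on with
  | _ n ih =>
    by_cases h10 : n < 10
    · rw [pvDigitsChars, pvSumDigits]
      simp [h10, pvCharVal_digit n h10]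
    · rw [pvDigitsChars, pvSumDigits]
      simp only [h10, dite_false, List.map_append, List.sum_append, List.map_cons,
        List.map_nil, List.sum_cons, List.sum_nil]
      rw [ih (n / 10) (Nat.div_lt_self (by omega) (by omega))]
      simp only [pysem]
      rw [pvCharVal_digit (n % 10) (Nat.mod_lt _ (by omega))]
      push_cast
      ring

theorem pvAddDigits_natCast (m : Nat) : pvAddDigits (m : Int) = (pvSumDigits m : Int) := by
  unfold pvAddDigits
  rw [PySem.Int.toList_toStr]
  have : PySem.Int.toChars (m : Int) = pvDigitsChars m := by
    simp [PySem.Int.toChars, pvToDigits_eq]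
  rw [this, pvSumDigitsChars]

theorem pvSumDigits_le (n : Nat) : pvSumDigits n ≤ n := by
  induction n using Nat.strong_induction_on with
  | _ n ih =>
    rw [pvSumDigits]
    by_cases h10 : n < 10
    · simp [h10]
    · simp only [h10, dite_false]
      have h1 := ih (n / 10) (Nat.div_lt_self (by omega) (by omega))
      omega

theorem pvSumDigits_pos (n : Nat) (h : 1 ≤ n) : 1 ≤ pvSumDigits n := by
  induction n using Nat.strong_induction_on with
  | _ n ih =>
    rw [pvSumDigits]
    by_cases h10 : n < 10
    · simpa [h10]
    · simp only [h10, dite_false]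
      have h1 := ih (n / 10) (Nat.div_lt_self (by omega) (by omega)) (by omega)
      omega

theorem pvSumDigits_lt (n : Nat) (h : 10 ≤ n) : pvSumDigits n < n := by
  rw [pvSumDigits]
  simp only [show ¬ n < 10 by omega, dite_false]
  have := pvSumDigits_le (n / 10)
  omega

theorem pvSumDigits_mod9 (n : Nat) : pvSumDigits n % 9 = n % 9 := by
  induction n using Nat.strong_induction_on with
  | _ n ih =>
    rw [pvSumDigits]
    by_cases h10 : n < 10
    · simp [h10]
    · simp only [h10, dite_false]
      have h1 := ih (n / 10) (Nat.div_lt_self (by omega) (by omega))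
      omega

theorem pvDr_small (i : Int) (h0 : 0 ≤ i) (h9 : i ≤ 9) : pvDr i = i := by
  unfold pvDr
  by_cases hi : i = 0
  · simp [hi]
  · rw [if_neg hi, PySem.Int.mod_eq_emod_of_pos (by omega)]
    omega

theorem pvDr_congr (a b : Int) (ha : 1 ≤ a) (hb : 1 ≤ b) (h : a % 9 = b % 9) :
    pvDr a = pvDr b := by
  unfold pvDr
  rw [if_neg (by omega), if_neg (by omega),
    PySem.Int.mod_eq_emod_of_pos (by omega : (0:Int) < 9),
    PySem.Int.mod_eq_emod_of_pos (by omega : (0:Int) < 9)]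
  omega

-- the single step: with the memo table filled for all 1 ≤ x < i, the while loop returns pvDr i
theorem pvLoop_eq (DR : PySem.Dict Int Int) (m : Nat)
    (hget : ∀ x : Int, DR.get? x = if 0 ≤ x ∧ x < (m : Int) then some (pvDr x) else none) :
    pvLoop DR (((m : Int)).toNat + 1) (m : Int) = pvDr (m : Int) := by
  by_cases h9 : (m : Int) > 9
  · unfold pvLoop
    rw [if_pos h9]
    have hm10 : 10 ≤ m := by omega
    have hsum := pvAddDigits_natCast m
    have hlt := pvSumDigits_lt m hm10
    have hpos := pvSumDigits_pos m (by omega)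
    have hget' : DR.get? (pvAddDigits (m : Int)) = some (pvDr (pvSumDigits m : Int)) := by
      rw [hsum, hget]
      exact if_pos ⟨by positivity, by exact_mod_cast hlt⟩
    simp only [hget']
    exact pvDr_congr _ _ (by exact_mod_cast hpos)
      (by exact_mod_cast (by omega : (1:Nat) ≤ m))
      (by have := pvSumDigits_mod9 m; omega)
  · unfold pvLoop
    rw [if_neg h9]
    exact (pvDr_small _ (by positivity) (by omega)).symm

-- the fold invariant: items are exactly the closed-form pairs, and get? is the memo table
theorem pvFold_invariant (m : Nat) :
    (((PySem.List.pyRange 0 (m : Int) 1).foldl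
        (fun DR i => DR.insert i (pvLoop DR (i.toNat + 1) i)) PySem.Dict.empty).items
      = (PySem.List.pyRange 0 (m : Int) 1).map (fun i => (i, pvDr i)))
    ∧ (∀ x : Int, ((PySem.List.pyRange 0 (m : Int) 1).foldl
        (fun DR i => DR.insert i (pvLoop DR (i.toNat + 1) i)) PySem.Dict.empty).get? x
      = if 0 ≤ x ∧ x < (m : Int) then some (pvDr x) else none) := by
  induction m with
  | zero =>
    constructor
    · rfl
    · intro x
      simp only [PySem.List.pyRange_zero, Nat.cast_zero, Int.toNat_zero, List.range_zero,
        List.map_nil, List.foldl_nil]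
      rw [if_neg (by omega)]
      exact PySem.Dict.get?_empty x
  | succ m ih =>
    obtain ⟨ihItems, ihGet⟩ := ih
    have hstep : PySem.List.pyRange 0 ((m : Int) + 1) 1
        = PySem.List.pyRange 0 (m : Int) 1 ++ [(m : Int)] :=
      PySem.List.pyRange_one_succ_right (by positivity)
    have hloop := pvLoop_eq _ m ihGet
    have hnotmem : (((PySem.List.pyRange 0 (m : Int) 1).foldl
        (fun DR i => DR.insert i (pvLoop DR (i.toNat + 1) i)) PySem.Dict.empty)).contains
          (m : Int) = false := by
      rw [PySem.Dict.contains_eq_isSome_get?, ihGet]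
      rw [if_neg (by omega)]
      rfl
    push_cast [hstep]
    constructor
    · rw [List.foldl_append, List.map_append]
      simp only [List.foldl_cons, List.foldl_nil, List.map_cons, List.map_nil]
      rw [PySem.Dict.items_insert_of_not_contains _ _ hnotmem, ihItems, hloop]
    · intro x
      rw [List.foldl_append]
      simp only [List.foldl_cons, List.foldl_nil]
      rw [PySem.Dict.get?_insert, hloop, ihGet]
      by_cases hx : x = (m : Int)
      · rw [if_pos hx, hx, if_pos (by omega)]
      · rw [if_neg hx]
        by_cases hlt : 0 ≤ x ∧ x < (m : Int)
        · rw [if_pos hlt, if_pos (by omega)]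
        · rw [if_neg hlt, if_neg (by omega)]

-- ===== VERDICT (by name: the statement is the Claim_ definition above) =====
theorem compute_all_dr_spec : Claim_equal_compute_all_dr := by
  intro N _
  unfold Spec_compute_all_dr
  rw [pvAlt_eq_map]
  by_cases hN : 0 ≤ N
  · have hN' : N = ((N.toNat : Nat) : Int) := by omega
    rw [compute_all_dr, hN']
    exact (pvFold_invariant N.toNat).1
  · have hle : N ≤ 0 := by omega
    have hempty : PySem.List.pyRange 0 N 1 = [] := by
      rw [PySem.List.pyRange_zero]
      simp [Int.toNat_of_nonpos hle]
    rw [compute_all_dr, hempty]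
    rfl
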